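-- pv_equiv track=rewrite | github.com/pypi-data/pypi-mirror-403 | packages/gms-mcp/gms_mcp-0.1.45.tar.gz/gms_mcp-0.1.45/src/gms_helpers/maintenance/static_search.py | find_asset_name_patterns
-- ===== SOURCE A (Python) =====
-- from typing import Set, Dict, List, Optional
--
-- def find_asset_name_patterns(filesystem_files: Set[str]) -> Dict[str, Set[str]]:
--     """
--     Extract asset names from filesystem paths using naming conventions.
--     Returns dict mapping asset types to sets of asset names found.
--     """
--     asset_names = {
--         'sprites': set(),
--         'sounds': set(),
--         'objects': set(),
--         'scripts': set(),
--         'rooms': set(),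
--         'fonts': set(),
--         'shaders': set()
--     }
--
--     for file_path in filesystem_files:
--         path_parts = file_path.split('/')
--
--         if len(path_parts) >= 2:
--             # Get the asset folder and name
--             folder = path_parts[0]
--             asset_name = path_parts[1]
--
--             # Map folder names to asset types
--             folder_mapping = {
--                 'sprites': 'sprites',
--                 'sounds': 'sounds',
--                 'objects': 'objects',
--                 'scripts': 'scripts',
--                 'rooms': 'rooms',
--                 'fonts': 'fonts',
--                 'shaders': 'shaders'
--             }
--
--             if folder in folder_mapping:
--                 asset_type = folder_mapping[folder]
--                 asset_names[asset_type].add(asset_name)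
--
--     return asset_names
-- ===== SOURCE B (Python) =====
-- ASSET_TYPES = ['sprites', 'sounds', 'objects', 'scripts', 'rooms', 'fonts', 'shaders']
--
-- def find_asset_name_patterns(filesystem_files):
--     """Category-outer decomposition: for each asset type, scan the files and
--     collect the second path segment of every path rooted at that type."""
--     result = {}
--     for asset_type in ASSET_TYPES:
--         names = set()
--         for file_path in filesystem_files:
--             parts = file_path.split('/')
--             if len(parts) >= 2 and parts[0] == asset_type:
--                 names.add(parts[1])
--         result[asset_type] = names
--     return result
-- ===== Notes on version B (the rewrite author's own statement) =====
-- stated objective: idiomatic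
-- what changed: Inverted the traversal: instead of one routing pass over the files that dispatches each path into a pre-built dict of seven sets, B iterates over the fixed list of asset types and for each type filters the file collection for paths rooted at that type, collecting second segments.
import Mathlib
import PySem

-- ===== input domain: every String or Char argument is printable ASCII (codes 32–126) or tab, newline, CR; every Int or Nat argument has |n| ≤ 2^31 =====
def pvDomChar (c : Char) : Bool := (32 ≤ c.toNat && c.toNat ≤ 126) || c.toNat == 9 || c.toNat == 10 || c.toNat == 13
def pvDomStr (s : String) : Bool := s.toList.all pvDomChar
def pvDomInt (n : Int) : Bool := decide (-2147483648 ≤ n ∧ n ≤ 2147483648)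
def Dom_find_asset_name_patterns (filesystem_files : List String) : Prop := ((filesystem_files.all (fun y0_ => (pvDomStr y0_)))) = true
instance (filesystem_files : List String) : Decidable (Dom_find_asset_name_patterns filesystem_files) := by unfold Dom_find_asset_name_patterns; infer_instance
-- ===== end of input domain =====

-- B inverts A's traversal: per-asset-type filtering passes instead of one routing pass into a dict of sets (idiomatic objective; same return value).

-- ===== PORT A =====
-- body of A's 'for file_path in filesystem_files' loop over the dict of seven sets.
-- file_path.split('/') with the non-empty literal separator never raises, so split? is always some: .getD [] is exact.
def pvStepA (d : PySem.Dict String (PySem.Set String)) (file_path : String) :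
    PySem.Dict String (PySem.Set String) :=
  let path_parts := (PySem.Str.split? file_path "/").getD []
  if 2 ≤ path_parts.length then
    let folder := path_parts.getD 0 ""
    let asset_name := path_parts.getD 1 ""
    let folder_mapping : PySem.Dict String String := PySem.Dict.ofList
      [("sprites", "sprites"), ("sounds", "sounds"), ("objects", "objects"),
       ("scripts", "scripts"), ("rooms", "rooms"), ("fonts", "fonts"), ("shaders", "shaders")]
    if folder_mapping.contains folder then
      -- folder_mapping[folder]: key present here (guarded by 'in'), so get?.getD "" is exact
      let asset_type := (folder_mapping.get? folder).getD ""
      d.modify asset_type PySem.Set.empty (fun s => PySem.Set.add s asset_name)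
    else d
  else d

def find_asset_name_patterns (filesystem_files : List String) : List (String × List String) :=
  let asset_names : PySem.Dict String (PySem.Set String) := PySem.Dict.ofList
    [("sprites", PySem.Set.empty), ("sounds", PySem.Set.empty), ("objects", PySem.Set.empty),
     ("scripts", PySem.Set.empty), ("rooms", PySem.Set.empty), ("fonts", PySem.Set.empty),
     ("shaders", PySem.Set.empty)]
  (filesystem_files.foldl pvStepA asset_names).items

-- ===== PORT B =====
-- B's inner loop for one asset type: scan the files, keep second segments of paths rooted at this type
def pvGatherB (filesystem_files : List String) (asset_type : String) (names : PySem.Set String) :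
    PySem.Set String :=
  filesystem_files.foldl
    (fun names file_path =>
      let parts := (PySem.Str.split? file_path "/").getD []
      if 2 ≤ parts.length ∧ parts.getD 0 "" = asset_type then
        PySem.Set.add names (parts.getD 1 "")
      else names)
    names

def find_asset_name_patterns_alt (filesystem_files : List String) : List (String × List String) :=
  ["sprites", "sounds", "objects", "scripts", "rooms", "fonts", "shaders"].map
    (fun asset_type => (asset_type, pvGatherB filesystem_files asset_type PySem.Set.empty))

-- ===== PRECONDITION & SPEC =====
def Spec_find_asset_name_patterns (filesystem_files : List String) (out : List (String × List String)) : Prop := out = find_asset_name_patterns_alt filesystem_files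
instance (filesystem_files : List String) (out : List (String × List String)) : Decidable (Spec_find_asset_name_patterns filesystem_files out) := by unfold Spec_find_asset_name_patterns; infer_instance

-- ===== CLAIM (what is proved, stated in full; the proofs are below) =====
def Claim_equal_find_asset_name_patterns : Prop := ∀ (filesystem_files : List String), Dom_find_asset_name_patterns filesystem_files → Spec_find_asset_name_patterns filesystem_files (find_asset_name_patterns filesystem_files)

-- ===== LEMMAS AND PROOFS =====

-- loop invariant: A's fold over the seven-key dict computes, per key, B's gathering fold
lemma pvLoop_eq (fs : List String) (s1 s2 s3 s4 s5 s6 s7 : PySem.Set String) :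
    (fs.foldl pvStepA (PySem.Dict.mk
      [("sprites", s1), ("sounds", s2), ("objects", s3), ("scripts", s4),
       ("rooms", s5), ("fonts", s6), ("shaders", s7)])).items
    = [("sprites", pvGatherB fs "sprites" s1), ("sounds", pvGatherB fs "sounds" s2),
       ("objects", pvGatherB fs "objects" s3), ("scripts", pvGatherB fs "scripts" s4),
       ("rooms", pvGatherB fs "rooms" s5), ("fonts", pvGatherB fs "fonts" s6),
       ("shaders", pvGatherB fs "shaders" s7)] := by
  induction fs generalizing s1 s2 s3 s4 s5 s6 s7 with
  | nil => rfl
  | cons fp fs ih =>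
    have hstep : pvStepA (PySem.Dict.mk
        [("sprites", s1), ("sounds", s2), ("objects", s3), ("scripts", s4),
         ("rooms", s5), ("fonts", s6), ("shaders", s7)]) fp
      = PySem.Dict.mk
        [("sprites", if 2 ≤ ((PySem.Str.split? fp "/").getD []).length ∧ ((PySem.Str.split? fp "/").getD []).getD 0 "" = "sprites" then PySem.Set.add s1 (((PySem.Str.split? fp "/").getD []).getD 1 "") else s1),
         ("sounds",  if 2 ≤ ((PySem.Str.split? fp "/").getD []).length ∧ ((PySem.Str.split? fp "/").getD []).getD 0 "" = "sounds"  then PySem.Set.add s2 (((PySem.Str.split? fp "/").getD []).getD 1 "") else s2),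
         ("objects", if 2 ≤ ((PySem.Str.split? fp "/").getD []).length ∧ ((PySem.Str.split? fp "/").getD []).getD 0 "" = "objects" then PySem.Set.add s3 (((PySem.Str.split? fp "/").getD []).getD 1 "") else s3),
         ("scripts", if 2 ≤ ((PySem.Str.split? fp "/").getD []).length ∧ ((PySem.Str.split? fp "/").getD []).getD 0 "" = "scripts" then PySem.Set.add s4 (((PySem.Str.split? fp "/").getD []).getD 1 "") else s4),
         ("rooms",   if 2 ≤ ((PySem.Str.split? fp "/").getD []).length ∧ ((PySem.Str.split? fp "/").getD []).getD 0 "" = "rooms"   then PySem.Set.add s5 (((PySem.Str.split? fp "/").getD []).getD 1 "") else s5),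
         ("fonts",   if 2 ≤ ((PySem.Str.split? fp "/").getD []).length ∧ ((PySem.Str.split? fp "/").getD []).getD 0 "" = "fonts"   then PySem.Set.add s6 (((PySem.Str.split? fp "/").getD []).getD 1 "") else s6),
         ("shaders", if 2 ≤ ((PySem.Str.split? fp "/").getD []).length ∧ ((PySem.Str.split? fp "/").getD []).getD 0 "" = "shaders" then PySem.Set.add s7 (((PySem.Str.split? fp "/").getD []).getD 1 "") else s7)] := by
      by_cases h2 : 2 ≤ ((PySem.Str.split? fp "/").getD []).length
      · by_cases hf1 : ((PySem.Str.split? fp "/").getD [])[0]?.getD "" = "sprites"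
        · simp [pvStepA, h2, hf1, PySem.Dict.contains, PySem.Dict.ofList, PySem.Dict.modify,
                PySem.Dict.get?, PySem.Dict.getD, PySem.Dict.update, PySem.Dict.insert,
                PySem.Dict.empty, PySem.Dict.items]
        · by_cases hf2 : ((PySem.Str.split? fp "/").getD [])[0]?.getD "" = "sounds"
          · simp [pvStepA, h2, hf1, hf2, PySem.Dict.contains, PySem.Dict.ofList, PySem.Dict.modify,
                  PySem.Dict.get?, PySem.Dict.getD, PySem.Dict.update, PySem.Dict.insert,
                  PySem.Dict.empty, PySem.Dict.items]
          · by_cases hf3 : ((PySem.Str.split? fp "/").getD [])[0]?.getD "" = "objects"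
            · simp [pvStepA, h2, hf1, hf2, hf3, PySem.Dict.contains, PySem.Dict.ofList, PySem.Dict.modify,
                    PySem.Dict.get?, PySem.Dict.getD, PySem.Dict.update, PySem.Dict.insert,
                    PySem.Dict.empty, PySem.Dict.items]
            · by_cases hf4 : ((PySem.Str.split? fp "/").getD [])[0]?.getD "" = "scripts"
              · simp [pvStepA, h2, hf1, hf2, hf3, hf4, PySem.Dict.contains, PySem.Dict.ofList, PySem.Dict.modify,
                      PySem.Dict.get?, PySem.Dict.getD, PySem.Dict.update, PySem.Dict.insert,
                      PySem.Dict.empty, PySem.Dict.items]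
              · by_cases hf5 : ((PySem.Str.split? fp "/").getD [])[0]?.getD "" = "rooms"
                · simp [pvStepA, h2, hf1, hf2, hf3, hf4, hf5, PySem.Dict.contains, PySem.Dict.ofList, PySem.Dict.modify,
                        PySem.Dict.get?, PySem.Dict.getD, PySem.Dict.update, PySem.Dict.insert,
                        PySem.Dict.empty, PySem.Dict.items]
                · by_cases hf6 : ((PySem.Str.split? fp "/").getD [])[0]?.getD "" = "fonts"
                  · simp [pvStepA, h2, hf1, hf2, hf3, hf4, hf5, hf6, PySem.Dict.contains, PySem.Dict.ofList, PySem.Dict.modify,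
                          PySem.Dict.get?, PySem.Dict.getD, PySem.Dict.update, PySem.Dict.insert,
                          PySem.Dict.empty, PySem.Dict.items]
                  · by_cases hf7 : ((PySem.Str.split? fp "/").getD [])[0]?.getD "" = "shaders"
                    · simp [pvStepA, h2, hf1, hf2, hf3, hf4, hf5, hf6, hf7, PySem.Dict.contains, PySem.Dict.ofList, PySem.Dict.modify,
                            PySem.Dict.get?, PySem.Dict.getD, PySem.Dict.update, PySem.Dict.insert,
                            PySem.Dict.empty, PySem.Dict.items]
                    · have gs : ∀ t : String, ¬ ((PySem.Str.split? fp "/").getD [])[0]?.getD "" = t →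
                          ¬ t = ((PySem.Str.split? fp "/").getD [])[0]?.getD "" :=
                        fun _ h h' => h h'.symm
                      simp [pvStepA, h2, hf1, hf2, hf3, hf4, hf5, hf6, hf7,
                            gs _ hf1, gs _ hf2, gs _ hf3, gs _ hf4, gs _ hf5, gs _ hf6, gs _ hf7,
                            PySem.Dict.contains, PySem.Dict.ofList, PySem.Dict.update,
                            PySem.Dict.insert, PySem.Dict.empty, PySem.Dict.items]
      · simp [pvStepA, h2]
    calc ((fp :: fs).foldl pvStepA _).items
        = (fs.foldl pvStepA (pvStepA _ fp)).items := rfl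
      _ = _ := by rw [hstep, ih]; rfl

-- ===== VERDICT (by name: the statement is the Claim_ definition above) =====
theorem find_asset_name_patterns_spec : Claim_equal_find_asset_name_patterns := by
  intro fs _
  unfold Spec_find_asset_name_patterns find_asset_name_patterns find_asset_name_patterns_alt
  exact pvLoop_eq fs _ _ _ _ _ _ _
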